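-- pv_equiv track=rewrite | github.com/paiml/depyler | examples/hard_heap_sort.py | build_heap
-- ===== SOURCE A (Python) =====
-- def sift_down(arr: list[int], start: int, end: int) -> list[int]:
--     """Sift element at start down to maintain max-heap property."""
--     root: int = start
--     result: list[int] = arr[:]
--     cont: int = 1
--     while cont == 1:
--         child: int = 2 * root + 1
--         if child > end:
--             cont = 0
--         else:
--             swap: int = root
--             if result[swap] < result[child]:
--                 swap = child
--             if child + 1 <= end and result[swap] < result[child + 1]:
--                 swap = child + 1
--             if swap == root:
--                 cont = 0
--             else:
--                 tmp: int = result[root]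
--                 result[root] = result[swap]
--                 result[swap] = tmp
--                 root = swap
--     return result
--
-- def build_heap(arr: list[int]) -> list[int]:
--     """Build a max-heap from an unsorted array."""
--     result: list[int] = arr[:]
--     n: int = len(result)
--     start: int = (n - 2) // 2
--     while start >= 0:
--         result = sift_down(result, start, n - 1)
--         start = start - 1
--     return result
-- ===== SOURCE B (Python) =====
-- def _sift(heap, n, pos):
--     """Recursively sift heap[pos] down, mutating heap in place."""
--     child = 2 * pos + 1
--     if child >= n:
--         return
--     if child + 1 < n and heap[child + 1] > heap[child]:
--         child += 1
--     if heap[child] > heap[pos]: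
--         heap[pos], heap[child] = heap[child], heap[pos]
--         _sift(heap, n, child)
--
-- def build_heap(arr: list[int]) -> list[int]:
--     """Build a max-heap from an unsorted array."""
--     heap = list(arr)
--     n = len(heap)
--     for start in reversed(range(n // 2)):
--         _sift(heap, n, start)
--     return heap
-- ===== Notes on version B (the rewrite author's own statement) =====
-- stated objective: faster
-- what changed: A copies the whole array on every sift_down call and drives the sift with a cont-flag while loop; B mutates one list in place with a recursive sift-down that picks the larger child first, folding over reversed(range(n//2)), removing the O(n) copy per node.
import Mathlib
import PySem

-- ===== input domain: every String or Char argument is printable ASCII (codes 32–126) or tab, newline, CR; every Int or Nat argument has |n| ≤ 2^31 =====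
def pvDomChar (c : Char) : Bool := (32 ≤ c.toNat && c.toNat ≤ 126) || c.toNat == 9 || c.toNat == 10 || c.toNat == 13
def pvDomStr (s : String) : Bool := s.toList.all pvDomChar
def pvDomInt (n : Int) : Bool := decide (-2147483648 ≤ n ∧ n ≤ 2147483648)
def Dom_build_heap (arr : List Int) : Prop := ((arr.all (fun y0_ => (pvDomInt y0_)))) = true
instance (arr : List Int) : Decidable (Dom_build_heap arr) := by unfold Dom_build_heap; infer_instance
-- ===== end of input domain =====

-- B replaces A's copy-per-call, flag-driven iterative sift with an in-place recursive
-- sift (larger child chosen first) over reversed(range(n//2)); same return value.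

-- ===== PORT A =====
-- sift_down's `while cont == 1` loop. `fuel` only bounds iterations (the root index
-- strictly increases toward `e`, so (e - start).toNat + 1 iterations always suffice);
-- all list indices reached from build_heap are in range, so pyGetD's default is never read.
def siftLoopA : Nat → List Int → Int → Int → List Int
  | 0, result, _, _ => result
  | Nat.succ fuel, result, e, root =>
    let child := 2 * root + 1
    if child > e then result
    else
      let swap1 := if PySem.List.pyGetD result root 0 < PySem.List.pyGetD result child 0 then child else root
      let swap2 := if child + 1 ≤ e ∧ PySem.List.pyGetD result swap1 0 < PySem.List.pyGetD result (child + 1) 0 then child + 1 else swap1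
      if swap2 = root then result
      else
        let tmp := PySem.List.pyGetD result root 0
        let result1 := PySem.List.pySetD result root (PySem.List.pyGetD result swap2 0)
        let result2 := PySem.List.pySetD result1 swap2 tmp
        siftLoopA fuel result2 e swap2

def sift_down (arr : List Int) (start e : Int) : List Int :=
  siftLoopA ((e - start).toNat + 1) (PySem.List.slice arr none none) e start

-- build_heap's `while start >= 0` loop
def buildLoopA (result : List Int) (n start : Int) : List Int :=
  if _h : start ≥ 0 then buildLoopA (sift_down result start (n - 1)) n (start - 1) else result
termination_by (start + 1).toNat
decreasing_by omega

def build_heap (arr : List Int) : List Int :=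
  let result := PySem.List.slice arr none none
  let n : Int := result.length
  buildLoopA result n (PySem.Int.floordiv (n - 2) 2)

-- ===== PORT B =====
-- recursive in-place sift: pick the larger child, swap if it beats the parent, recurse
def siftB (heap : List Int) (n pos : Nat) : List Int :=
  if _h1 : 2 * pos + 1 < n then
    let child := if 2 * pos + 2 < n ∧ heap.getD (2 * pos + 2) 0 > heap.getD (2 * pos + 1) 0
                 then 2 * pos + 2 else 2 * pos + 1
    if heap.getD child 0 > heap.getD pos 0 then
      siftB ((heap.set pos (heap.getD child 0)).set child (heap.getD pos 0)) n child
    else heap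
  else heap
termination_by n - pos
decreasing_by simp only [child] at *; split_ifs at * <;> omega

def build_heap_alt (arr : List Int) : List Int :=
  let n := arr.length
  ((List.range (n / 2)).reverse).foldl (fun h s => siftB h n s) arr

-- ===== PRECONDITION & SPEC =====
def Spec_build_heap (arr : List Int) (out : List Int) : Prop := out = build_heap_alt arr
instance (arr : List Int) (out : List Int) : Decidable (Spec_build_heap arr out) := by unfold Spec_build_heap; infer_instance

-- ===== CLAIM (what is proved, stated in full; the proofs are below) =====
def Claim_equal_build_heap : Prop := ∀ (arr : List Int), Dom_build_heap arr → Spec_build_heap arr (build_heap arr)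

-- ===== LEMMAS AND PROOFS =====

theorem length_siftB (heap : List Int) (n pos : Nat) : (siftB heap n pos).length = heap.length := by
  fun_induction siftB with
  | case1 heap n pos h1 child ih => simpa using ih
  | case2 => rfl
  | case3 => rfl

theorem siftLoopA_eq_siftB : ∀ (fuel : Nat) (heap : List Int) (n pos : Nat),
    heap.length = n → n - pos ≤ fuel →
    siftLoopA fuel heap ((n : Int) - 1) (pos : Int) = siftB heap n pos := by
  intro fuel
  induction fuel with
  | zero =>
    intro heap n pos hl hf
    rw [siftB, dif_neg (by omega)]
    rfl
  | succ fuel ih =>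
    intro heap n pos hl hf
    by_cases hc : 2 * pos + 1 < n
    · rw [siftB, dif_pos hc]
      have hA : (2 * (pos:Int) + 1) = ((2*pos+1 : Nat) : Int) := by push_cast; ring
      have hA' : (((2*pos+1 : Nat) : Int) + 1) = ((2*pos+2 : Nat) : Int) := by push_cast; ring
      have hcc : ¬ ((n:Int) - 1 < ((2*pos+1 : Nat) : Int)) := by omega
      simp only [siftLoopA, hA, hA', gt_iff_lt, PySem.List.pyGetD_natCast, if_neg hcc]
      have hle : (((2*pos+2:Nat):Int) ≤ (n:Int) - 1) ↔ 2 * pos + 2 < n := by omega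
      by_cases h1 : heap.getD pos 0 < heap.getD (2*pos+1) 0
      · simp only [if_pos h1, PySem.List.pyGetD_natCast, hle]
        by_cases h2 : heap.getD (2*pos+1) 0 < heap.getD (2*pos+2) 0
        · by_cases hr : 2 * pos + 2 < n
          · have hne : ¬ (((2*pos+2:Nat):Int) = (pos:Int)) := by omega
            have hB : heap.getD pos 0 < heap.getD (2*pos+2) 0 := by omega
            simp only [hr, h2, hB, and_self, if_neg hne,
              PySem.List.pySetD_natCast, PySem.List.pyGetD_natCast, if_pos]
            exact ih _ n (2*pos+2) (by simpa using hl) (by omega)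
          · have hne : ¬ (((2*pos+1:Nat):Int) = (pos:Int)) := by omega
            simp only [hr, false_and, if_false, if_neg hne, h1, if_pos,
              PySem.List.pySetD_natCast, PySem.List.pyGetD_natCast]
            exact ih _ n (2*pos+1) (by simpa using hl) (by omega)
        · have hne : ¬ (((2*pos+1:Nat):Int) = (pos:Int)) := by omega
          simp only [h2, and_false, if_false, if_neg hne, h1, if_pos,
            PySem.List.pySetD_natCast, PySem.List.pyGetD_natCast]
          exact ih _ n (2*pos+1) (by simpa using hl) (by omega)
      · simp only [if_neg h1, PySem.List.pyGetD_natCast, hle]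
        by_cases h2 : heap.getD pos 0 < heap.getD (2*pos+2) 0
        · by_cases hr : 2 * pos + 2 < n
          · have hne : ¬ (((2*pos+2:Nat):Int) = (pos:Int)) := by omega
            have hRL : heap.getD (2*pos+1) 0 < heap.getD (2*pos+2) 0 := by omega
            simp only [hr, h2, hRL, and_self, if_neg hne,
              PySem.List.pySetD_natCast, PySem.List.pyGetD_natCast, if_pos]
            exact ih _ n (2*pos+2) (by simpa using hl) (by omega)
          · simp only [hr, false_and, if_false, h1]
            rw [if_pos trivial]
        · simp only [h2, and_false, if_false]
          rw [if_pos trivial]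
          by_cases hRL : heap.getD (2*pos+1) 0 < heap.getD (2*pos+2) 0
          · by_cases hr : 2 * pos + 2 < n
            · simp only [hr, hRL, and_self, if_true, if_neg h2]
            · simp only [hr, false_and, if_false, if_neg h1]
          · simp only [if_neg (show ¬ (2*pos+2 < n ∧ heap.getD (2*pos+1) 0 < heap.getD (2*pos+2) 0) from fun h => hRL h.2), if_neg h1]
    · rw [siftB, dif_neg hc]
      have hcc : (n:Int) - 1 < 2 * (pos:Int) + 1 := by omega
      simp only [siftLoopA, gt_iff_lt, if_pos hcc]

theorem buildLoopA_eq (n : Nat) : ∀ (s : Nat) (heap : List Int), heap.length = n →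
    buildLoopA heap (n : Int) ((s : Int) - 1)
      = (List.range s).reverse.foldl (fun h i => siftB h n i) heap := by
  intro s
  induction s with
  | zero =>
    intro heap hl
    rw [buildLoopA]
    norm_num
  | succ s ih =>
    intro heap hl
    rw [buildLoopA, dif_pos (by omega)]
    have hs : ((s+1 : Nat) : Int) - 1 = (s : Nat) := by push_cast; ring
    have hsd : sift_down heap (((s+1:Nat):Int) - 1) ((n:Int) - 1) = siftB heap n s := by
      rw [hs]
      unfold sift_down
      rw [PySem.List.slice_none_none]
      exact siftLoopA_eq_siftB _ heap n s hl (by omega)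
    rw [hsd]
    have hs2 : ((s+1 : Nat) : Int) - 1 - 1 = ((s:Nat):Int) - 1 := by push_cast; ring
    rw [hs2, ih _ (by rw [length_siftB]; exact hl)]
    rw [List.range_succ, List.reverse_append]
    simp

theorem floordiv_sub_two (n : Nat) :
    PySem.Int.floordiv ((n : Int) - 2) 2 = ((n / 2 : Nat) : Int) - 1 := by
  match n with
  | 0 => decide
  | 1 => decide
  | (m+2) =>
    have h1 : ((m+2 : Nat) : Int) - 2 = ((m : Nat) : Int) := by push_cast; ring
    have h2 : PySem.Int.floordiv (m : Int) 2 = ((m / 2 : Nat) : Int) := by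
      exact_mod_cast PySem.Int.floordiv_natCast m 2
    rw [h1, h2]; omega

-- ===== VERDICT (by name: the statement is the Claim_ definition above) =====
theorem build_heap_spec : Claim_equal_build_heap := by
  intro arr _
  unfold Spec_build_heap build_heap build_heap_alt
  simp only [PySem.List.slice_none_none]
  rw [floordiv_sub_two, buildLoopA_eq arr.length (arr.length / 2) arr rfl]
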